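-- pv_equiv track=rewrite | github.com/xpmv-code/Student-Attendance-Management-System | app/utils/week_helper.py | is_in_week_range
-- ===== SOURCE A (Python) =====
-- def is_in_week_range(week_number, week_range_str):
--     """
--     判断指定周次是否在周次范围内
--
--     Args:
--         week_number: 周次（1-20）
--         week_range_str: 周次范围字符串（如：1-8,13,15,17 或 9-16）
--
--     Returns:
--         bool: True表示在范围内，False表示不在范围内
--     """
--     if not week_range_str:
--         return True  # 如果没有设置范围，默认所有周都上课
--
--     # 解析周次范围
--     week_set = set()
--     parts = week_range_str.split(',')
--
--     for part in parts:
--         part = part.strip()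
--         if '-' in part:
--             # 范围格式：1-8
--             try:
--                 start, end = part.split('-')
--                 week_set.update(range(int(start), int(end) + 1))
--             except ValueError:
--                 continue
--         else:
--             # 单个周次：13
--             try:
--                 week_set.add(int(part))
--             except ValueError:
--                 continue
--
--     return week_number in week_set
-- ===== SOURCE B (Python) =====
-- def _parse_part(part):
--     """Parse one comma-separated piece into an inclusive interval (lo, hi), or None if unparsable."""
--     part = part.strip()
--     if '-' in part:
--         pieces = part.split('-')
--         if len(pieces) != 2:
--             return None
--         try:
--             return (int(pieces[0]), int(pieces[1]))
--         except ValueError: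
--             return None
--     try:
--         v = int(part)
--         return (v, v)
--     except ValueError:
--         return None
--
--
-- def is_in_week_range(week_number, week_range_str):
--     if not week_range_str:
--         return True
--     intervals = [iv for iv in map(_parse_part, week_range_str.split(',')) if iv is not None]
--     return any(lo <= week_number <= hi for lo, hi in intervals)
-- ===== Notes on version B (the rewrite author's own statement) =====
-- stated objective: simpler
-- what changed: B drops A's materialised set of all weeks: a parse stage maps each comma-separated part to an inclusive interval (or None), and membership is then a single any() of lo <= week_number <= hi over the parsed intervals.
import Mathlib
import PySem

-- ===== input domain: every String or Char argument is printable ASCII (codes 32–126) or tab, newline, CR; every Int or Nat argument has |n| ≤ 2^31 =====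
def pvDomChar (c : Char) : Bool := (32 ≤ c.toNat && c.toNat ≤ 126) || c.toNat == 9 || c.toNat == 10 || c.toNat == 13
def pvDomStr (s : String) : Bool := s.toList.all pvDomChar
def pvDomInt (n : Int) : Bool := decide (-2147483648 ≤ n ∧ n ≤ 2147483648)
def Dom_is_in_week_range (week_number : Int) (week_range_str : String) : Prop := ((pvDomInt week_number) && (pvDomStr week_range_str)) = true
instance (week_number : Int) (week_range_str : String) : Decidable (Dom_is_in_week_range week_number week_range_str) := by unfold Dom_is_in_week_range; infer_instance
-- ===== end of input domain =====

-- B replaces A's materialised week-set by a parse stage (each part → an inclusive interval or none)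
-- followed by an any() membership test over the intervals (objective: simpler).

-- ===== PORT A =====
-- A's loop: accumulate the parsed weeks into a Python set, part by part.
def pvALoop (ws : PySem.Set Int) : List (List Char) → PySem.Set Int
  | [] => ws
  | p :: rest =>
    let part := PySem.Chars.strip p
    if PySem.Chars.isIn ['-'] part then
      -- try: start, end = part.split('-'); week_set.update(range(int(start), int(end)+1))
      match PySem.Chars.splitOn part ['-'] with
      | [s, e] =>
        match PySem.Int.ofChars? s with
        | none => pvALoop ws rest
        | some sv =>
          match PySem.Int.ofChars? e with
          | none => pvALoop ws rest
          | some ev => pvALoop (PySem.Set.update ws (PySem.List.pyRange sv (ev + 1) 1)) rest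
      | _ => pvALoop ws rest          -- unpacking raised ValueError: continue
    else
      match PySem.Int.ofChars? part with
      | none => pvALoop ws rest       -- int() raised ValueError: continue
      | some v => pvALoop (PySem.Set.add ws v) rest

def is_in_week_range (week_number : Int) (week_range_str : String) : Bool :=
  if week_range_str.toList = [] then true
  else
    PySem.Set.contains
      (pvALoop PySem.Set.empty (PySem.Chars.splitOn week_range_str.toList [','])) week_number

-- ===== PORT B =====
-- B's parse stage: one part → one inclusive interval, or none if unparsable.
def pvParsePart (p : List Char) : Option (Int × Int) :=
  let part := PySem.Chars.strip p
  if PySem.Chars.isIn ['-'] part then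
    match PySem.Chars.splitOn part ['-'] with
    | [s, e] =>
      match PySem.Int.ofChars? s, PySem.Int.ofChars? e with
      | some sv, some ev => some (sv, ev)
      | _, _ => none
    | _ => none
  else (PySem.Int.ofChars? part).map (fun v => (v, v))

def is_in_week_range_alt (week_number : Int) (week_range_str : String) : Bool :=
  if week_range_str.toList = [] then true
  else
    ((PySem.Chars.splitOn week_range_str.toList [',']).filterMap pvParsePart).any
      (fun iv => decide (iv.1 ≤ week_number ∧ week_number ≤ iv.2))

-- ===== PRECONDITION & SPEC =====
def Spec_is_in_week_range (week_number : Int) (week_range_str : String) (out : Bool) : Prop := out = is_in_week_range_alt week_number week_range_str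
instance (week_number : Int) (week_range_str : String) (out : Bool) : Decidable (Spec_is_in_week_range week_number week_range_str out) := by unfold Spec_is_in_week_range; infer_instance

-- ===== CLAIM (what is proved, stated in full; the proofs are below) =====
def Claim_equal_is_in_week_range : Prop := ∀ (week_number : Int) (week_range_str : String), Dom_is_in_week_range week_number week_range_str → Spec_is_in_week_range week_number week_range_str (is_in_week_range week_number week_range_str)

-- ===== LEMMAS AND PROOFS =====

-- invariant: membership in A's accumulated set = membership already there, or some parsed interval contains wn
theorem pvLoop_mem (wn : Int) (parts : List (List Char)) (ws : PySem.Set Int) :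
    wn ∈ pvALoop ws parts ↔
      wn ∈ ws ∨ ((parts.filterMap pvParsePart).any
        (fun iv => decide (iv.1 ≤ wn ∧ wn ≤ iv.2))) = true := by
  induction parts generalizing ws with
  | nil => simp [pvALoop]
  | cons p rest ih =>
    simp only [pvALoop, List.filterMap_cons]
    by_cases hd : PySem.Chars.isIn ['-'] (PySem.Chars.strip p) = true
    · rw [if_pos hd]
      rcases h2 : PySem.Chars.splitOn (PySem.Chars.strip p) ['-'] with _ | ⟨s, _ | ⟨e, _ | _⟩⟩
      · have hpp : pvParsePart p = none := by simp [pvParsePart, hd, h2]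
        simp only [hpp, ih]
      · have hpp : pvParsePart p = none := by simp [pvParsePart, hd, h2]
        simp only [hpp, ih]
      · rcases hs : PySem.Int.ofChars? s with _ | sv
        · have hpp : pvParsePart p = none := by simp [pvParsePart, hd, h2, hs]
          simp only [hs, hpp, ih]
        rcases he : PySem.Int.ofChars? e with _ | ev
        · have hpp : pvParsePart p = none := by simp [pvParsePart, hd, h2, hs, he]
          simp only [hs, he, hpp, ih]
        · have hpp : pvParsePart p = some (sv, ev) := by simp [pvParsePart, hd, h2, hs, he]
          simp only [hs, he, hpp, ih, PySem.Set.mem_update, PySem.List.mem_pyRange_one,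
            List.any_cons, Bool.or_eq_true, decide_eq_true_eq]
          constructor
          · rintro ((h | ⟨h1, h2'⟩) | h)
            · exact Or.inl h
            · exact Or.inr (Or.inl ⟨h1, by omega⟩)
            · exact Or.inr (Or.inr h)
          · rintro (h | ⟨h1, h2'⟩ | h)
            · exact Or.inl (Or.inl h)
            · exact Or.inl (Or.inr ⟨h1, by omega⟩)
            · exact Or.inr h
      · have hpp : pvParsePart p = none := by simp [pvParsePart, hd, h2]
        simp only [hpp, ih]
    · rw [if_neg hd]
      rcases hp : PySem.Int.ofChars? (PySem.Chars.strip p) with _ | v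
      · have hpp : pvParsePart p = none := by simp [pvParsePart, hd, hp]
        simp only [hpp, ih]
      · have hpp : pvParsePart p = some (v, v) := by simp [pvParsePart, hd, hp]
        simp only [hpp, ih, PySem.Set.mem_add, List.any_cons, Bool.or_eq_true,
          decide_eq_true_eq]
        constructor
        · rintro ((h | h) | h)
          · exact Or.inl h
          · exact Or.inr (Or.inl (by omega))
          · exact Or.inr (Or.inr h)
        · rintro (h | h | h)
          · exact Or.inl (Or.inl h)
          · exact Or.inl (Or.inr (by omega))
          · exact Or.inr h

-- ===== VERDICT (by name: the statement is the Claim_ definition above) =====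
theorem is_in_week_range_spec : Claim_equal_is_in_week_range := by
  intro wn s _
  unfold Spec_is_in_week_range is_in_week_range is_in_week_range_alt
  split
  · rfl
  · rw [Bool.eq_iff_iff, PySem.Set.contains_iff, pvLoop_mem]
    simp [PySem.Set.empty]
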